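-- pv_equiv track=rewrite | github.com/abc90155/centerWeb | welcome/utils.py | set_false_after_first_false
-- ===== SOURCE A (Python) =====
-- def set_false_after_first_false(data):
--     first_false = False
--     for key in data:
--         if data[key] == False:
--             first_false = True
--         if first_false:
--             data[key] = False
--     return data
-- ===== SOURCE B (Python) =====
-- def set_false_after_first_false(data):
--     # Like A, mutates the dict in place (same side effect); two passes: locate the
--     # first False, then bulk-overwrite from that key onward.
--     keys = list(data)
--     for i, k in enumerate(keys):
--         if data[k] == False:
--             break
--     else:
--         return data
--     for k in keys[i:]:
--         data[k] = False
--     return data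
-- ===== Notes on version B (the rewrite author's own statement) =====
-- stated objective: alternative
-- what changed: Replaces A's single-pass running-flag scan that rewrites each entry as it goes with a locate-then-bulk-apply decomposition: first find the index of the first False value (returning the dict untouched if none), then overwrite every key from that index on.
import Mathlib
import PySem

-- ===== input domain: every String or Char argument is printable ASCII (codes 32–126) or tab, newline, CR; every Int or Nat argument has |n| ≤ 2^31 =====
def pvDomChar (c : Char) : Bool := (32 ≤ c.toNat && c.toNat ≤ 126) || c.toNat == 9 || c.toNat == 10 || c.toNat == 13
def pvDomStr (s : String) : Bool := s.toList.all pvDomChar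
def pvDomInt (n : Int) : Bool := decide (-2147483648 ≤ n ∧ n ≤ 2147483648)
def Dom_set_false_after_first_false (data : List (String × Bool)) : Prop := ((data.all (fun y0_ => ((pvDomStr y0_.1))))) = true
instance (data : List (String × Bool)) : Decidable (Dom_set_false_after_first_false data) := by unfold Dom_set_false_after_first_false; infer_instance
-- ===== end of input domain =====

-- B replaces A's single-pass running-flag scan with locate-first-False then bulk-overwrite;
-- like A it mutates the Python dict in place (same side effect), the theorems are about the return value.
-- ===== PORT A =====
-- the loop: flag `first_false` carried through the entries in insertion order
def pvScanA (firstFalse : Bool) : List (String × Bool) → List (String × Bool)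
  | [] => []
  | kv :: rest =>
    let ff := if kv.2 == false then true else firstFalse
    (if ff then (kv.1, false) else kv) :: pvScanA ff rest

def set_false_after_first_false (data : List (String × Bool)) : List (String × Bool) :=
  pvScanA false data

-- ===== PORT B =====
-- first loop of Source B: index of the first entry whose value is False (none = the for/else `return data`)
def pvFindCut : List (String × Bool) → Option Nat
  | [] => none
  | kv :: rest => if kv.2 == false then some 0 else (pvFindCut rest).map (· + 1)

def set_false_after_first_false_alt (data : List (String × Bool)) : List (String × Bool) :=
  match pvFindCut data with
  | none => data
  | some i => data.take i ++ (data.drop i).map (fun kv => (kv.1, false))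

-- ===== PRECONDITION & SPEC =====
def Spec_set_false_after_first_false (data : List (String × Bool)) (out : List (String × Bool)) : Prop := out = set_false_after_first_false_alt data
instance (data : List (String × Bool)) (out : List (String × Bool)) : Decidable (Spec_set_false_after_first_false data out) := by unfold Spec_set_false_after_first_false; infer_instance

-- ===== CLAIM (what is proved, stated in full; the proofs are below) =====
def Claim_equal_set_false_after_first_false : Prop := ∀ (data : List (String × Bool)), Dom_set_false_after_first_false data → Spec_set_false_after_first_false data (set_false_after_first_false data)

-- ===== LEMMAS AND PROOFS =====

lemma pvScanA_true (l : List (String × Bool)) :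
    pvScanA true l = l.map (fun kv => (kv.1, false)) := by
  induction l with
  | nil => rfl
  | cons kv rest ih => simp [pvScanA, ih]

lemma pvScanA_false_eq_alt (l : List (String × Bool)) :
    pvScanA false l = set_false_after_first_false_alt l := by
  induction l with
  | nil => rfl
  | cons kv rest ih =>
    by_cases h : kv.2 = false
    · simp [pvScanA, set_false_after_first_false_alt, pvFindCut, h, pvScanA_true]
    · have h' : kv.2 = true := by cases hb : kv.2 <;> simp_all
      cases hc : pvFindCut rest with
      | none =>
        simp only [set_false_after_first_false_alt, hc] at ih
        simp [pvScanA, set_false_after_first_false_alt, pvFindCut, h', ih, hc]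
      | some i =>
        simp only [set_false_after_first_false_alt, hc] at ih
        simp [pvScanA, set_false_after_first_false_alt, pvFindCut, h', ih, hc]

-- ===== VERDICT =====
theorem set_false_after_first_false_spec : Claim_equal_set_false_after_first_false := by
  intro data _
  unfold Spec_set_false_after_first_false set_false_after_first_false
  exact pvScanA_false_eq_alt data
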